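-- pv_equiv track=rewrite | github.com/vivek-2000/Dsa-and-interview | test_random/persp.py | funct
-- ===== SOURCE A (Python) =====
-- def funct(mat,k):
--     count=0
--     if mat[0][0]<k:
--         count+=1
--         for i in range(1,k):
--             if mat[0][0]*i<k:
--                 count+=1
--     return count
-- ===== SOURCE B (Python) =====
-- def funct(mat, k):
--     v = mat[0][0]
--     if v >= k:
--         return 0
--     if k <= 1:
--         return 1
--     if v <= 0:
--         return k
--     return 1 + (k - 1) // v
-- ===== Notes on version B (the rewrite author's own statement) =====
-- stated objective: alternative
-- what changed: Replaced A's loop counting i in range(1,k) with mat[0][0]*i<k by a loop-free closed-form division count: 0 if v>=k, 1 if k<=1, k if v<=0, else 1+(k-1)//v; intended as asymptotically faster in k, but a timing run (sizes vary the matrix, not k) could not confirm it, so no speed is claimed.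
import Mathlib
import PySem

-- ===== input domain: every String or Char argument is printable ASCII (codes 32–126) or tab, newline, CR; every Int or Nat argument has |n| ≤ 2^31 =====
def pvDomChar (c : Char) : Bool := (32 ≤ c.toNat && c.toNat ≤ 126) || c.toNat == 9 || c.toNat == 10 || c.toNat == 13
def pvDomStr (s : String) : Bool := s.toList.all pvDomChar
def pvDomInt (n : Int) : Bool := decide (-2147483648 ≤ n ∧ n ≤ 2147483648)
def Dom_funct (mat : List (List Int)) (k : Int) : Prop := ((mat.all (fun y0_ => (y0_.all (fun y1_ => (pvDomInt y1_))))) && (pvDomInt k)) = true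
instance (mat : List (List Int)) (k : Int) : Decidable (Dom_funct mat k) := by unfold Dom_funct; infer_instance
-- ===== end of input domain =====

-- B replaces A's counting loop over range(1,k) by a closed-form division count (sign casework on mat[0][0]); objective: alternative (loop-free).

-- ===== PORT A =====
def funct (mat : List (List Int)) (k : Int) : Int :=
  let count : Int := 0
  let v := PySem.List.pyGetD (PySem.List.pyGetD mat 0 []) 0 0   -- mat[0][0]; total here, Pre_ excludes the IndexError inputs
  if v < k then
    (PySem.List.pyRange 1 k 1).foldl
      (fun count i => if v * i < k then count + 1 else count) (count + 1)
  else count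

-- ===== PORT B =====
def funct_alt (mat : List (List Int)) (k : Int) : Int :=
  let v := PySem.List.pyGetD (PySem.List.pyGetD mat 0 []) 0 0
  if v ≥ k then 0
  else if k ≤ 1 then 1
  else if v ≤ 0 then k
  else 1 + PySem.Int.floordiv (k - 1) v

-- ===== PRECONDITION & SPEC =====
-- Pre_ excludes exactly the inputs where A raises IndexError (mat or its first row empty).
def Pre_funct (mat : List (List Int)) (k : Int) : Prop := mat ≠ [] ∧ mat.headI ≠ []
instance (mat : List (List Int)) (k : Int) : Decidable (Pre_funct mat k) := by unfold Pre_funct; infer_instance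
def pvWitness_funct : List (List Int) × Int := ([[3, 1], [2, 5]], 10)
def Spec_funct (mat : List (List Int)) (k : Int) (out : Int) : Prop := out = funct_alt mat k
instance (mat : List (List Int)) (k : Int) (out : Int) : Decidable (Spec_funct mat k out) := by unfold Spec_funct; infer_instance

-- ===== CLAIM (what is proved, stated in full; the proofs are below) =====
def Claim_equal_funct : Prop := ∀ (mat : List (List Int)) (k : Int), Dom_funct mat k → Pre_funct mat k → Spec_funct mat k (funct mat k)

-- ===== LEMMAS AND PROOFS =====

/-- The counting fold adds `countP` to its accumulator. -/
lemma foldl_count (P : Int → Prop) [DecidablePred P] (L : List Int) (c : Int) :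
    L.foldl (fun c i => if P i then c + 1 else c) c = c + (L.countP (fun i => decide (P i)) : Int) := by
  induction L generalizing c with
  | nil => simp
  | cons x xs ih =>
    by_cases h : P x <;> simp [h, ih] <;> ring

lemma countP_range_lt (m n : Nat) :
    (List.range n).countP (fun j => decide (j < m)) = min m n := by
  induction n with
  | zero => simp
  | succ n ih =>
    rw [List.range_succ, List.countP_append, ih]
    by_cases h : n < m <;> simp [h] <;> omega

/-- Shift a count over `range n` mapped through `1 + ·`. -/
lemma count_shift (Q : Int → Prop) [DecidablePred Q] (n : Nat) :
    List.countP (fun i => decide (Q i)) ((List.range n).map (fun j : Nat => 1 + (j : Int))) =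
      List.countP (fun j : Nat => decide (Q (1 + (j : Int)))) (List.range n) := by
  rw [List.countP_map]
  exact List.countP_congr (fun j _ => by simp [Function.comp])

/-- Closed form of A's loop (started at accumulator 1), for `v < k`. -/
lemma loop_closed_form (v k : Int) :
    (PySem.List.pyRange 1 k 1).foldl (fun c i => if v * i < k then c + 1 else c) 1 =
      if k ≤ 1 then 1 else if v ≤ 0 then k else 1 + PySem.Int.floordiv (k - 1) v := by
  rw [foldl_count (fun i => v * i < k)]
  by_cases hk : k ≤ 1
  · rw [PySem.List.pyRange_one_eq_nil (by omega)]
    simp [hk]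
  · have hk2 : 2 ≤ k := by omega
    rw [PySem.List.pyRange_one, count_shift (fun i => v * i < k)]
    by_cases hv : v ≤ 0
    · have hall : List.countP (fun j : Nat => decide (v * (1 + (j : Int)) < k))
          (List.range (k - 1).toNat) = (k - 1).toNat := by
        calc List.countP (fun j : Nat => decide (v * (1 + (j : Int)) < k))
              (List.range (k - 1).toNat) = (List.range (k - 1).toNat).length := by
              rw [List.countP_eq_length]
              intro j _
              have h1 : v * (1 + (j : Int)) ≤ 0 :=
                mul_nonpos_of_nonpos_of_nonneg hv (by positivity)
              exact decide_eq_true (by omega)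
          _ = (k - 1).toNat := List.length_range
      rw [hall]
      simp [hk, hv]
      omega
    · -- v ≥ 1
      have hv1 : 1 ≤ v := by omega
      have hfd : PySem.Int.floordiv (k - 1) v = (k - 1) / v :=
        PySem.Int.floordiv_eq_ediv_of_pos (by omega)
      set d : Int := (k - 1) / v with hd
      have hd0 : 0 ≤ d := Int.ediv_nonneg (by omega) (by omega)
      have hdle : d ≤ k - 1 := Int.ediv_le_self _ (by omega)
      have hiff : ∀ j : Nat, (v * (1 + (j : Int)) < k) ↔ (j < d.toNat) := by
        intro j
        have h2 : (1 + (j : Int)) * v ≤ k - 1 ↔ 1 + (j : Int) ≤ d := by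
          rw [hd]
          exact (Int.le_ediv_iff_mul_le (by omega)).symm
        constructor
        · intro h
          have : 1 + (j : Int) ≤ d := h2.mp (by linarith)
          omega
        · intro h
          have h3 : 1 + (j : Int) ≤ d := by omega
          have := h2.mpr h3
          have : v * (1 + (j : Int)) ≤ k - 1 := by linarith
          omega
      have hcong : List.countP (fun j : Nat => decide (v * (1 + (j : Int)) < k))
          (List.range (k - 1).toNat) =
          List.countP (fun j : Nat => decide (j < d.toNat)) (List.range (k - 1).toNat) :=
        List.countP_congr (fun j _ => by simp [hiff j])
      rw [hcong, countP_range_lt]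
      have hmin : min d.toNat (k - 1).toNat = d.toNat := by omega
      rw [hmin]
      have hvlt : ¬ v ≤ 0 := by omega
      simp [hk, hvlt, hfd]
      omega

-- ===== VERDICT (by name: the statement is the Claim_ definition above) =====
theorem funct_spec : Claim_equal_funct := by
  intro mat k _ _
  unfold Spec_funct funct funct_alt
  simp only
  set v := PySem.List.pyGetD (PySem.List.pyGetD mat 0 []) 0 0 with hv
  by_cases hvk : v < k
  · rw [if_pos hvk, zero_add, loop_closed_form v k, if_neg (by omega : ¬ v ≥ k)]
  · rw [if_neg hvk, if_pos (by omega : v ≥ k)]
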